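-- pv_equiv track=rewrite | github.com/2ndpic/leetcode | leetcode/editor/cn/[1631]最小体力消耗路径.py | bfs
-- ===== SOURCE A (Python) =====
-- import collections
--
-- def bfs(heights, mid, m, n):
--     q, visited = collections.deque([(0, 0)]), {(0,0)}
--     while q:
--         x, y = q.popleft()
--         for nx, ny in [(x - 1, y), (x + 1, y), (x, y - 1), (x, y + 1)]:
--             if (0 <= nx < m and 0 <= ny < n) and (nx, ny) not in visited and abs(
--                     heights[x][y] - heights[nx][ny]) <= mid:
--                 visited.add((nx, ny))
--                 q.append((nx, ny))
--     return (m-1, n-1) in visited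
-- ===== SOURCE B (Python) =====
-- def bfs(heights, mid, m, n):
--     # Union-find over the m*n cells: union every in-bounds right/down pair whose
--     # height difference is within mid, then test whether the two corners share a root.
--     if m <= 0 or n <= 0:
--         return False
--     total = m * n
--     parent = list(range(total))
--
--     def find(x):
--         while parent[x] != x:
--             x = parent[x]
--         return x
--
--     def union(a, b):
--         ra, rb = find(a), find(b)
--         if ra < rb:
--             parent[rb] = ra
--         elif rb < ra:
--             parent[ra] = rb
--
--     for i in range(m):
--         for j in range(n):
--             if j + 1 < n and abs(heights[i][j] - heights[i][j + 1]) <= mid: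
--                 union(i * n + j, i * n + j + 1)
--             if i + 1 < m and abs(heights[i][j] - heights[i + 1][j]) <= mid:
--                 union(i * n + j, (i + 1) * n + j)
--     return find(0) == find(total - 1)
-- ===== Notes on version B (the rewrite author's own statement) =====
-- stated objective: alternative
-- what changed: Replaces the BFS frontier expansion (deque + visited set) by a disjoint-set forest: one raster sweep unions each cell with its right/down neighbour when the height gap is within mid, then compares the roots of the two corners (plus the natural empty-grid guard returning False).
-- outside the precondition, e.g. on bfs([[0, 0], [0, 0]], -1, 3, 3): A returns False, B raises IndexError
import Mathlib
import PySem

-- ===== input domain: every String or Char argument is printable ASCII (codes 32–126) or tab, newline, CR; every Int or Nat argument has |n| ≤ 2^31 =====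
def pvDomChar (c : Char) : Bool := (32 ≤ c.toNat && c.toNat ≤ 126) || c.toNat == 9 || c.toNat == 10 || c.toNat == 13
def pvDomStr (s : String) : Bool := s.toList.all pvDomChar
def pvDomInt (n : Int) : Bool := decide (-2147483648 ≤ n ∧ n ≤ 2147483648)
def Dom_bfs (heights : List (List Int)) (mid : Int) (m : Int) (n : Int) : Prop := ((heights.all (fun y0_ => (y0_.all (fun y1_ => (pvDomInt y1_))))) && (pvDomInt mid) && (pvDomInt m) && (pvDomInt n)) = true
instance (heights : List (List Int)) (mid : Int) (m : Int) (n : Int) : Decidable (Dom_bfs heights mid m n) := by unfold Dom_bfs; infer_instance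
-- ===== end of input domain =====

-- B replaces A's BFS frontier (deque + visited set) by a disjoint-set forest built in one
-- raster sweep over the grid's right/down edges; equal corner-connectivity answer on every m×n grid.

-- heights[x][y]; exact for the in-range indices 0 ≤ x < len(heights), 0 ≤ y < len(row)
-- that both loops use under Pre_bfs (Python raises outside; pyGetD's default is never read inside Pre_).
def pvH (heights : List (List Int)) (x y : Int) : Int :=
  PySem.List.pyGetD (PySem.List.pyGetD heights x []) y 0

-- ===== PORT A =====
-- body of A's inner `for nx, ny in [...]` loop: conditionally mark visited and enqueue
def pvStep (heights : List (List Int)) (mid m n x y : Int)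
    (s : PySem.Set (Int × Int) × List (Int × Int)) (c : Int × Int) :
    PySem.Set (Int × Int) × List (Int × Int) :=
  if (0 ≤ c.1 ∧ c.1 < m ∧ 0 ≤ c.2 ∧ c.2 < n) ∧ ¬ PySem.Set.contains s.1 c = true ∧
      |pvH heights x y - pvH heights c.1 c.2| ≤ mid
  then (PySem.Set.add s.1 c, s.2 ++ [c])
  else s

-- A's `while q:` loop; the fuel is a totality guard only (under Pre_bfs it never runs out)
def bfsLoop (heights : List (List Int)) (mid m n : Int) :
    Nat → List (Int × Int) → PySem.Set (Int × Int) → PySem.Set (Int × Int)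
  | 0, _, visited => visited
  | _ + 1, [], visited => visited
  | fuel + 1, (x, y) :: qs, visited =>
      let st := [(x - 1, y), (x + 1, y), (x, y - 1), (x, y + 1)].foldl
        (pvStep heights mid m n x y) (visited, qs)
      bfsLoop heights mid m n fuel st.2 st.1

def bfs (heights : List (List Int)) (mid : Int) (m : Int) (n : Int) : Bool :=
  let visited := bfsLoop heights mid m n ((m * n).toNat + 1) [(0, 0)]
    (PySem.Set.ofList [((0 : Int), (0 : Int))])
  PySem.Set.contains visited (m - 1, n - 1)

-- ===== PORT B =====
-- `while parent[x] != x: x = parent[x]`; the fuel x.toNat+1 is a totality guard only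
-- (parent[x] ≤ x throughout B's runs, so it never runs out)
def pvFindAux (parent : List Int) : Nat → Int → Int
  | 0, x => x
  | fuel + 1, x =>
      let p := PySem.List.pyGetD parent x 0
      if p = x then x else pvFindAux parent fuel p

def pvFind (parent : List Int) (x : Int) : Int := pvFindAux parent (x.toNat + 1) x

def pvUnion (parent : List Int) (a b : Int) : List Int :=
  let ra := pvFind parent a
  let rb := pvFind parent b
  if ra < rb then PySem.List.pySetD parent rb ra
  else if rb < ra then PySem.List.pySetD parent ra rb
  else parent

-- body of B's per-cell work: the two conditional unions (right neighbour, down neighbour)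
def pvCell (heights : List (List Int)) (mid m n : Int) (par : List Int) (c : Int × Int) :
    List Int :=
  let par1 := if c.2 + 1 < n ∧ |pvH heights c.1 c.2 - pvH heights c.1 (c.2 + 1)| ≤ mid
    then pvUnion par (c.1 * n + c.2) (c.1 * n + c.2 + 1) else par
  if c.1 + 1 < m ∧ |pvH heights c.1 c.2 - pvH heights (c.1 + 1) c.2| ≤ mid
    then pvUnion par1 (c.1 * n + c.2) ((c.1 + 1) * n + c.2) else par1

def bfs_alt (heights : List (List Int)) (mid : Int) (m : Int) (n : Int) : Bool :=
  if m ≤ 0 ∨ n ≤ 0 then false else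
  let total := m * n
  let parent := ((PySem.List.pyRange 0 m 1).flatMap
      (fun i => (PySem.List.pyRange 0 n 1).map (fun j => (i, j)))).foldl
    (pvCell heights mid m n) (PySem.List.pyRange 0 total 1)
  decide (pvFind parent 0 = pvFind parent (total - 1))

-- ===== PRECONDITION & SPEC =====
-- Pre_bfs admits the degenerate declarations (m ≤ 0 or n ≤ 0, or m = n = 1, where neither
-- program touches heights) and every genuine m×n grid; it excludes only the inputs whose
-- heights do not cover the declared positive grid — there A raises IndexError on the first
-- missing cell its frontier probes (or accidentally returns False when the missing cells
-- are unreachable) while B's full sweep raises IndexError.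
def Pre_bfs (heights : List (List Int)) (mid : Int) (m : Int) (n : Int) : Prop :=
  (m ≤ 0 ∨ n ≤ 0) ∨ (m = 1 ∧ n = 1) ∨
  (1 ≤ m ∧ 1 ≤ n ∧ m ≤ (heights.length : Int) ∧
    ∀ row ∈ heights.take m.toNat, n ≤ (row.length : Int))
instance (heights : List (List Int)) (mid : Int) (m : Int) (n : Int) : Decidable (Pre_bfs heights mid m n) := by unfold Pre_bfs; infer_instance
def pvWitness_bfs : List (List Int) × Int × Int × Int := ([[1, 3], [2, 10]], 2, 2, 2)

def Spec_bfs (heights : List (List Int)) (mid : Int) (m : Int) (n : Int) (out : Bool) : Prop := out = bfs_alt heights mid m n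
instance (heights : List (List Int)) (mid : Int) (m : Int) (n : Int) (out : Bool) : Decidable (Spec_bfs heights mid m n out) := by unfold Spec_bfs; infer_instance

-- ===== CLAIM (what is proved, stated in full; the proofs are below) =====
def Claim_equal_bfs : Prop := ∀ (heights : List (List Int)) (mid : Int) (m : Int) (n : Int), Dom_bfs heights mid m n → Pre_bfs heights mid m n → Spec_bfs heights mid m n (bfs heights mid m n)

-- ===== LEMMAS AND PROOFS =====

-- the common ground: adjacency of in-bounds cells with height gap ≤ mid, and reachability
def pvGood (m n : Int) (c : Int × Int) : Prop := 0 ≤ c.1 ∧ c.1 < m ∧ 0 ≤ c.2 ∧ c.2 < n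

def pvAdj (heights : List (List Int)) (mid m n : Int) (c d : Int × Int) : Prop :=
  pvGood m n c ∧ pvGood m n d ∧
  ((c.1 = d.1 ∧ (c.2 + 1 = d.2 ∨ d.2 + 1 = c.2)) ∨
   (c.2 = d.2 ∧ (c.1 + 1 = d.1 ∨ d.1 + 1 = c.1))) ∧
  |pvH heights c.1 c.2 - pvH heights d.1 d.2| ≤ mid

def pvReach (heights : List (List Int)) (mid m n : Int) : Int × Int → Int × Int → Prop :=
  Relation.ReflTransGen (pvAdj heights mid m n)


-- --- generic reflexive-transitive-closure tools ---

theorem pvRtg_closed {α : Type} {r : α → α → Prop} {S : α → Prop}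
    (hc : ∀ a b, S a → r a b → S b) {x y : α}
    (h : Relation.ReflTransGen r x y) (hx : S x) : S y := by
  induction h with
  | refl => exact hx
  | tail _ hstep ih => exact hc _ _ ih hstep

theorem pvRtg_iff {α : Type} {r s : α → α → Prop} (h : ∀ a b, r a b ↔ s a b) {x y : α} :
    Relation.ReflTransGen r x y ↔ Relation.ReflTransGen s x y :=
  ⟨Relation.ReflTransGen.mono (fun a b hr => (h a b).mp hr),
   Relation.ReflTransGen.mono (fun a b hs => (h a b).mpr hs)⟩

theorem pvRtg_empty {α : Type} {r : α → α → Prop} (h : ∀ a b, ¬ r a b) {x y : α} :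
    Relation.ReflTransGen r x y ↔ x = y := by
  constructor
  · intro hxy
    induction hxy with
    | refl => rfl
    | tail _ hstep _ => exact absurd hstep (h _ _)
  · rintro rfl; exact .refl

theorem pvRtg_join {α : Type} (r : α → α → Prop) (a b x y : α) :
    Relation.ReflTransGen (fun u v => r u v ∨ (u = a ∧ v = b) ∨ (u = b ∧ v = a)) x y ↔
    (Relation.ReflTransGen r x y ∨
     (Relation.ReflTransGen r x a ∧ Relation.ReflTransGen r b y) ∨
     (Relation.ReflTransGen r x b ∧ Relation.ReflTransGen r a y)) := by
  constructor
  · intro h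
    induction h with
    | refl => exact Or.inl .refl
    | tail _ hstep ih =>
      rcases hstep with hr | ⟨rfl, rfl⟩ | ⟨rfl, rfl⟩
      · rcases ih with h1 | ⟨h1, h2⟩ | ⟨h1, h2⟩
        · exact Or.inl (h1.tail hr)
        · exact Or.inr (Or.inl ⟨h1, h2.tail hr⟩)
        · exact Or.inr (Or.inr ⟨h1, h2.tail hr⟩)
      · rcases ih with h1 | ⟨h1, h2⟩ | ⟨h1, h2⟩
        · exact Or.inr (Or.inl ⟨h1, .refl⟩)
        · exact Or.inr (Or.inl ⟨h1, .refl⟩)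
        · exact Or.inl h1
      · rcases ih with h1 | ⟨h1, h2⟩ | ⟨h1, h2⟩
        · exact Or.inr (Or.inr ⟨h1, .refl⟩)
        · exact Or.inl h1
        · exact Or.inr (Or.inr ⟨h1, .refl⟩)
  · have lift : ∀ u v : α, Relation.ReflTransGen r u v →
        Relation.ReflTransGen (fun u v => r u v ∨ (u = a ∧ v = b) ∨ (u = b ∧ v = a)) u v :=
      fun u v h => h.mono (fun p q hr => Or.inl hr)
    rintro (h1 | ⟨h1, h2⟩ | ⟨h1, h2⟩)
    · exact lift _ _ h1
    · exact ((lift _ _ h1).tail (Or.inr (Or.inl ⟨rfl, rfl⟩))).trans (lift _ _ h2)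
    · exact ((lift _ _ h1).tail (Or.inr (Or.inr ⟨rfl, rfl⟩))).trans (lift _ _ h2)

-- --- counting: a duplicate-free list of in-bounds cells has at most m*n elements ---

theorem pvEnc_inj (n i j i' j' : Int) (hj0 : 0 ≤ j) (hjn : j < n) (hj0' : 0 ≤ j')
    (hjn' : j' < n) (h : i * n + j = i' * n + j') : i = i' ∧ j = j' := by
  rcases lt_trichotomy i i' with hlt | heq | hlt
  · have h1 : (1 : Int) * n ≤ (i' - i) * n :=
      mul_le_mul_of_nonneg_right (by omega) (by omega)
    have h2 : (i' - i) * n = j - j' := by linear_combination -h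
    have : (1 : Int) * n = n := one_mul n
    omega
  · constructor
    · exact heq
    · subst heq; omega
  · have h1 : (1 : Int) * n ≤ (i - i') * n :=
      mul_le_mul_of_nonneg_right (by omega) (by omega)
    have h2 : (i - i') * n = j' - j := by linear_combination h
    have : (1 : Int) * n = n := one_mul n
    omega

theorem pvEnc_range (m n i j : Int) (hi0 : 0 ≤ i) (him : i < m) (hj0 : 0 ≤ j)
    (hjn : j < n) : 0 ≤ i * n + j ∧ i * n + j < m * n := by
  constructor
  · have := mul_nonneg hi0 (by omega : (0:Int) ≤ n); omega
  · have h1 : (i + 1) * n ≤ m * n :=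
      mul_le_mul_of_nonneg_right (by omega) (by omega)
    have h2 : (i + 1) * n = i * n + n := by ring
    omega

theorem pvLength_le (m n : Int) (v : List (Int × Int)) (hnd : v.Nodup)
    (hg : ∀ c ∈ v, pvGood m n c) : v.length ≤ (m * n).toNat := by
  classical
  have hmap : (v.map (fun c => c.1 * n + c.2)).Nodup := by
    refine hnd.map_on ?_
    intro c hc d hd hEq
    have hgc := hg c hc
    have hgd := hg d hd
    obtain ⟨h1, h2⟩ := pvEnc_inj n c.1 c.2 d.1 d.2 hgc.2.2.1 hgc.2.2.2 hgd.2.2.1 hgd.2.2.2 hEq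
    exact Prod.ext h1 h2
  have hsub : (v.map (fun c => c.1 * n + c.2)).toFinset ⊆ Finset.Ico (0 : Int) (m * n) := by
    intro z hz
    rw [List.mem_toFinset, List.mem_map] at hz
    obtain ⟨c, hc, rfl⟩ := hz
    have hgc := hg c hc
    have := pvEnc_range m n c.1 c.2 hgc.1 hgc.2.1 hgc.2.2.1 hgc.2.2.2
    simp [Finset.mem_Ico, this.1, this.2]
  have hcard := Finset.card_le_card hsub
  rw [List.toFinset_card_of_nodup hmap, Int.card_Ico] at hcard
  simpa using hcard

-- --- the BFS loop computes exactly the set of cells reachable from (0,0) ---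

theorem pvStep_foldl (heights : List (List Int)) (mid m n x y : Int) :
    ∀ (cs : List (Int × Int)) (v q : List (Int × Int)), v.Nodup →
    ∃ ds : List (Int × Int),
      cs.foldl (pvStep heights mid m n x y) (v, q) = (v ++ ds, q ++ ds) ∧
      (v ++ ds).Nodup ∧
      (∀ c ∈ ds, c ∈ cs ∧ pvGood m n c ∧ |pvH heights x y - pvH heights c.1 c.2| ≤ mid) ∧
      (∀ c ∈ cs, pvGood m n c → |pvH heights x y - pvH heights c.1 c.2| ≤ mid →
        c ∈ v ++ ds) := by
  intro cs
  induction cs with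
  | nil =>
    intro v q hnd
    exact ⟨[], by simp, by simpa using hnd, by simp, by simp⟩
  | cons c cs ih =>
    intro v q hnd
    by_cases hg : (0 ≤ c.1 ∧ c.1 < m ∧ 0 ≤ c.2 ∧ c.2 < n) ∧ ¬ PySem.Set.contains v c = true ∧
        |pvH heights x y - pvH heights c.1 c.2| ≤ mid
    · have hnm : c ∉ v := by
        intro hmem
        exact hg.2.1 ((PySem.Set.contains_iff v c).mpr hmem)
      have hstep : pvStep heights mid m n x y (v, q) c = (v ++ [c], q ++ [c]) := by
        unfold pvStep
        rw [if_pos hg]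
        simp [PySem.Set.add_of_not_mem hnm]
      have hnd' : (v ++ [c]).Nodup := by
        rw [List.nodup_append]
        exact ⟨hnd, List.nodup_singleton _, by intro a hav b hbc hne; rw [List.mem_singleton] at hbc; subst hbc; subst hne; exact hnm hav⟩
      obtain ⟨ds, heq, hnd2, hin, hcov⟩ := ih (v ++ [c]) (q ++ [c]) hnd'
      refine ⟨c :: ds, ?_, ?_, ?_, ?_⟩
      · simpa [hstep, List.append_assoc] using heq
      · simpa [List.append_assoc] using hnd2
      · intro e he
        rcases List.mem_cons.mp he with rfl | he
        · exact ⟨List.mem_cons_self, hg.1, hg.2.2⟩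
        · obtain ⟨h1, h2, h3⟩ := hin e he
          exact ⟨List.mem_cons_of_mem _ h1, h2, h3⟩
      · intro e he hge hhe
        rcases List.mem_cons.mp he with rfl | he
        · simp
        · have := hcov e he hge hhe
          simpa [List.append_assoc] using this
    · have hstep : pvStep heights mid m n x y (v, q) c = (v, q) := by
        unfold pvStep
        rw [if_neg hg]
      obtain ⟨ds, heq, hnd2, hin, hcov⟩ := ih v q hnd
      refine ⟨ds, by simpa [hstep] using heq, hnd2, ?_, ?_⟩
      · intro e he
        obtain ⟨h1, h2, h3⟩ := hin e he
        exact ⟨List.mem_cons_of_mem _ h1, h2, h3⟩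
      · intro e he hge hhe
        rcases List.mem_cons.mp he with heq | he
        · -- the guard failed but bounds and height hold: c was already visited
          rw [heq] at hge hhe ⊢
          have hmem : c ∈ v := by
            by_contra hnm
            exact hg ⟨hge, fun hcon => hnm ((PySem.Set.contains_iff v c).mp hcon), hhe⟩
          exact List.mem_append_left _ hmem
        · exact hcov e he hge hhe

theorem pvBfsLoop_post (heights : List (List Int)) (mid m n : Int)
    (hm : 1 ≤ m) (hn : 1 ≤ n) :
    ∀ (fuel : Nat) (q v : List (Int × Int)),
      v.Nodup → (0, 0) ∈ v →
      (∀ c ∈ v, pvGood m n c) →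
      (∀ c ∈ v, pvReach heights mid m n (0, 0) c) →
      (∀ c ∈ q, c ∈ v) →
      (∀ c ∈ v, ∀ d, pvAdj heights mid m n c d → d ∈ v ∨ c ∈ q) →
      q.length + ((m * n).toNat - v.length) < fuel →
      ∀ e : Int × Int,
        e ∈ bfsLoop heights mid m n fuel q v ↔ pvReach heights mid m n (0, 0) e := by
  intro fuel
  induction fuel with
  | zero => intro q v _ _ _ _ _ _ hlt; omega
  | succ fuel ih =>
    intro q v hnd h00 hgood hreach hqv hfront hlt e
    match q with
    | [] =>
      show e ∈ v ↔ _
      constructor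
      · exact fun he => hreach e he
      · intro hr
        refine pvRtg_closed (S := fun c => c ∈ v) ?_ hr h00
        intro a b ha hab
        rcases hfront a ha b hab with hb | hq
        · exact hb
        · simp at hq
    | (x, y) :: qs =>
      have hxyv : (x, y) ∈ v := hqv _ List.mem_cons_self
      have hxyg : pvGood m n (x, y) := hgood _ hxyv
      have hxyr : pvReach heights mid m n (0, 0) (x, y) := hreach _ hxyv
      obtain ⟨ds, heq, hnd', hin, hcov⟩ :=
        pvStep_foldl heights mid m n x y [(x - 1, y), (x + 1, y), (x, y - 1), (x, y + 1)] v qs hnd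
      show e ∈ bfsLoop heights mid m n fuel _ _ ↔ _
      rw [heq]
      have hadj : ∀ c ∈ ds, pvAdj heights mid m n (x, y) c := by
        intro c hc
        obtain ⟨hmem, hg, hh⟩ := hin c hc
        refine ⟨hxyg, hg, ?_, hh⟩
        simp only [List.mem_cons, List.mem_singleton, List.not_mem_nil, or_false] at hmem
        obtain ⟨c1, c2⟩ := c
        rcases hmem with h | h | h | h
        all_goals (rw [Prod.mk.injEq] at h; simp; omega)
      have hgood' : ∀ c ∈ v ++ ds, pvGood m n c := by
        intro c hc
        rcases List.mem_append.mp hc with h | h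
        · exact hgood c h
        · exact (hin c h).2.1
      have hcard : (v ++ ds).length ≤ (m * n).toNat := pvLength_le m n _ hnd' hgood'
      refine ih (qs ++ ds) (v ++ ds) hnd' (List.mem_append_left _ h00) hgood' ?_ ?_ ?_ ?_ e
      · intro c hc
        rcases List.mem_append.mp hc with h | h
        · exact hreach c h
        · exact (hreach _ hxyv).tail (hadj c h)
      · intro c hc
        rcases List.mem_append.mp hc with h | h
        · exact List.mem_append_left _ (hqv _ (List.mem_cons_of_mem _ h))
        · exact List.mem_append_right _ h
      · intro c hc d hd
        rcases List.mem_append.mp hc with h | h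
        · rcases hfront c h d hd with h1 | h1
          · exact Or.inl (List.mem_append_left _ h1)
          · rcases List.mem_cons.mp h1 with h1 | h1
            · -- c = (x, y): every admissible neighbour got covered by the fold
              have hd4 : d ∈ [(x - 1, y), (x + 1, y), (x, y - 1), (x, y + 1)] := by
                obtain ⟨_, _, hshape, _⟩ := hd
                obtain ⟨d1, d2⟩ := d
                subst h1
                simp at hshape ⊢
                omega
              have hdh : |pvH heights x y - pvH heights d.1 d.2| ≤ mid := by
                have := hd.2.2.2
                subst h1
                exact this
              exact Or.inl (hcov d hd4 hd.2.1 hdh)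
            · exact Or.inr (List.mem_append_left _ h1)
        · exact Or.inr (List.mem_append_right _ h)
      · have hvd : v.length + ds.length ≤ (m * n).toNat := by simpa using hcard
        simp only [List.length_append]
        simp only [List.length_cons] at hlt
        omega

def pvPreGrid (heights : List (List Int)) (m n : Int) : Prop :=
  1 ≤ m ∧ 1 ≤ n ∧ m ≤ (heights.length : Int) ∧
  ∀ row ∈ heights.take m.toNat, n ≤ (row.length : Int)

theorem bfs_iff_reach (heights : List (List Int)) (mid m n : Int)
    (hp : pvPreGrid heights m n) :
    bfs heights mid m n = true ↔ pvReach heights mid m n (0, 0) (m - 1, n - 1) := by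
  obtain ⟨hm, hn, _, _⟩ := hp
  have hmn : (1 : Int) ≤ m * n := by
    calc (1 : Int) = 1 * 1 := by ring
    _ ≤ m * n := mul_le_mul hm hn (by norm_num) (by omega)
  have hof : PySem.Set.ofList [((0 : Int), (0 : Int))] = [((0 : Int), (0 : Int))] :=
    PySem.Set.ofList_eq_self_of_nodup _ (List.nodup_singleton _)
  show PySem.Set.contains
      (bfsLoop heights mid m n ((m * n).toNat + 1) [(0, 0)] (PySem.Set.ofList [(0, 0)]))
      (m - 1, n - 1) = true ↔ _
  rw [hof, PySem.Set.contains_iff]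
  refine pvBfsLoop_post heights mid m n hm hn ((m * n).toNat + 1) [(0, 0)] [(0, 0)]
    (List.nodup_singleton _) (List.mem_singleton.mpr rfl) ?_ ?_ ?_ ?_ ?_ (m - 1, n - 1)
  · intro c hc
    rw [List.mem_singleton] at hc
    subst hc
    exact ⟨le_refl 0, by omega, le_refl 0, by omega⟩
  · intro c hc
    rw [List.mem_singleton] at hc
    subst hc
    exact .refl
  · exact fun c hc => hc
  · intro c hc d _
    exact Or.inr hc
  · simp only [List.length_singleton]
    omega


-- --- union-find core: pvFind follows parent links to a strictly smaller root ---

def pvPar (parent : List Int) (x : Int) : Int := PySem.List.pyGetD parent x 0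

def pvUFInv (parent : List Int) : Prop :=
  ∀ k : Nat, (h : k < parent.length) → 0 ≤ parent[k] ∧ parent[k] ≤ (k : Int)

theorem pvPar_bounds (parent : List Int) (hInv : pvUFInv parent) (x : Int)
    (hx0 : 0 ≤ x) (hxl : x < (parent.length : Int)) :
    0 ≤ pvPar parent x ∧ pvPar parent x ≤ x := by
  have hxn : x.toNat < parent.length := by omega
  have hval : pvPar parent x = parent[x.toNat] :=
    PySem.List.pyGetD_eq_getElem _ 0 hx0 hxl
  have := hInv x.toNat hxn
  omega

theorem pvFindAux_congr (parent : List Int) (hInv : pvUFInv parent) :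
    ∀ (k : Nat) (x : Int), x.toNat ≤ k → 0 ≤ x → x < (parent.length : Int) →
    ∀ f1 f2 : Nat, x.toNat < f1 → x.toNat < f2 →
    pvFindAux parent f1 x = pvFindAux parent f2 x := by
  intro k
  induction k with
  | zero =>
    intro x hk hx0 hxl f1 f2 h1 h2
    obtain ⟨f1', rfl⟩ : ∃ f1', f1 = f1' + 1 := ⟨f1 - 1, by omega⟩
    obtain ⟨f2', rfl⟩ : ∃ f2', f2 = f2' + 1 := ⟨f2 - 1, by omega⟩
    have hx : x = 0 := by omega
    subst hx
    have hp := pvPar_bounds parent hInv 0 le_rfl hxl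
    have hp0 : pvPar parent 0 = 0 := by omega
    show (if pvPar parent 0 = 0 then (0:Int) else pvFindAux parent f1' (pvPar parent 0)) = _
    rw [if_pos hp0]
    rw [show pvFindAux parent (f2' + 1) 0 =
      (if pvPar parent 0 = 0 then (0:Int) else pvFindAux parent f2' (pvPar parent 0)) from rfl]
    rw [if_pos hp0]
  | succ k ihk =>
    intro x hk hx0 hxl f1 f2 h1 h2
    obtain ⟨f1', rfl⟩ : ∃ f1', f1 = f1' + 1 := ⟨f1 - 1, by omega⟩
    obtain ⟨f2', rfl⟩ : ∃ f2', f2 = f2' + 1 := ⟨f2 - 1, by omega⟩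
    have hp := pvPar_bounds parent hInv x hx0 hxl
    show (if pvPar parent x = x then x else pvFindAux parent f1' (pvPar parent x)) = _
    rw [show pvFindAux parent (f2' + 1) x =
      (if pvPar parent x = x then x else pvFindAux parent f2' (pvPar parent x)) from rfl]
    by_cases hroot : pvPar parent x = x
    · rw [if_pos hroot, if_pos hroot]
    · rw [if_neg hroot, if_neg hroot]
      have hplt : pvPar parent x < x := lt_of_le_of_ne hp.2 hroot
      exact ihk (pvPar parent x) (by omega) hp.1 (by omega) f1' f2' (by omega) (by omega)

theorem pvFind_step (parent : List Int) (hInv : pvUFInv parent) (x : Int)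
    (hx0 : 0 ≤ x) (hxl : x < (parent.length : Int)) :
    pvFind parent x = if pvPar parent x = x then x else pvFind parent (pvPar parent x) := by
  have hp := pvPar_bounds parent hInv x hx0 hxl
  show pvFindAux parent (x.toNat + 1) x = _
  rw [show pvFindAux parent (x.toNat + 1) x =
    (if pvPar parent x = x then x else pvFindAux parent x.toNat (pvPar parent x)) from rfl]
  by_cases hroot : pvPar parent x = x
  · rw [if_pos hroot, if_pos hroot]
  · rw [if_neg hroot, if_neg hroot]
    have hplt : pvPar parent x < x := lt_of_le_of_ne hp.2 hroot
    exact pvFindAux_congr parent hInv (pvPar parent x).toNat (pvPar parent x) le_rfl hp.1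
      (by omega) x.toNat ((pvPar parent x).toNat + 1) (by omega) (by omega)

theorem pvFind_root (parent : List Int) (hInv : pvUFInv parent) (x : Int)
    (hx0 : 0 ≤ x) (hxl : x < (parent.length : Int)) (hroot : pvPar parent x = x) :
    pvFind parent x = x := by
  rw [pvFind_step parent hInv x hx0 hxl, if_pos hroot]

theorem pvFind_props (parent : List Int) (hInv : pvUFInv parent) :
    ∀ (k : Nat) (x : Int), x.toNat ≤ k → 0 ≤ x → x < (parent.length : Int) →
    0 ≤ pvFind parent x ∧ pvFind parent x ≤ x ∧
      pvPar parent (pvFind parent x) = pvFind parent x := by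
  intro k
  induction k with
  | zero =>
    intro x hk hx0 hxl
    have hx : x = 0 := by omega
    subst hx
    have hp := pvPar_bounds parent hInv 0 le_rfl hxl
    have hroot : pvPar parent 0 = 0 := by omega
    rw [pvFind_root parent hInv 0 le_rfl hxl hroot]
    exact ⟨le_rfl, le_rfl, hroot⟩
  | succ k ihk =>
    intro x hk hx0 hxl
    rw [pvFind_step parent hInv x hx0 hxl]
    by_cases hroot : pvPar parent x = x
    · rw [if_pos hroot]
      exact ⟨hx0, le_rfl, hroot⟩
    · rw [if_neg hroot]
      have hp := pvPar_bounds parent hInv x hx0 hxl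
      have hplt : pvPar parent x < x := lt_of_le_of_ne hp.2 hroot
      have := ihk (pvPar parent x) (by omega) hp.1 (by omega)
      exact ⟨this.1, by omega, this.2.2⟩

theorem pvFind_spec (parent : List Int) (hInv : pvUFInv parent) (x : Int)
    (hx0 : 0 ≤ x) (hxl : x < (parent.length : Int)) :
    0 ≤ pvFind parent x ∧ pvFind parent x ≤ x ∧
      pvPar parent (pvFind parent x) = pvFind parent x :=
  pvFind_props parent hInv x.toNat x le_rfl hx0 hxl

-- --- effect of parent[rb] := ra (ra, rb distinct roots, ra < rb) on every root ---

theorem pvPar_set (parent : List Int) (ra rb x : Int) (hrb0 : 0 ≤ rb)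
    (hrbl : rb < (parent.length : Int)) (hx0 : 0 ≤ x) (hxl : x < (parent.length : Int)) :
    pvPar (parent.set rb.toNat ra) x = if x = rb then ra else pvPar parent x := by
  have hxl' : x < ((parent.set rb.toNat ra).length : Int) := by
    rw [List.length_set]; exact hxl
  have h1 : pvPar (parent.set rb.toNat ra) x = (parent.set rb.toNat ra)[x.toNat]'(by
      rw [List.length_set]; omega) :=
    PySem.List.pyGetD_eq_getElem _ 0 hx0 hxl'
  rw [h1, List.getElem_set]
  by_cases h : x = rb
  · subst h
    rw [if_pos rfl, if_pos rfl]
  · have hne : rb.toNat ≠ x.toNat := by omega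
    rw [if_neg hne, if_neg h]
    exact (PySem.List.pyGetD_eq_getElem _ 0 hx0 hxl).symm

theorem pvUFInv_set (parent : List Int) (hInv : pvUFInv parent) (ra rb : Int)
    (hra0 : 0 ≤ ra) (hrab : ra ≤ rb) (hrb0 : 0 ≤ rb) :
    pvUFInv (parent.set rb.toNat ra) := by
  intro k hk
  rw [List.length_set] at hk
  rw [List.getElem_set]
  by_cases h : rb.toNat = k
  · rw [if_pos h]
    constructor
    · exact hra0
    · have : (k : Int) = rb := by omega
      omega
  · rw [if_neg h]
    exact hInv k hk

theorem pvFind_set (parent : List Int) (hInv : pvUFInv parent) (ra rb : Int)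
    (hra0 : 0 ≤ ra) (hrab : ra < rb) (hrbl : rb < (parent.length : Int))
    (hrootb : pvPar parent rb = rb) (hroota : pvPar parent ra = ra) :
    ∀ (k : Nat) (x : Int), x.toNat ≤ k → 0 ≤ x → x < (parent.length : Int) →
    pvFind (parent.set rb.toNat ra) x =
      if pvFind parent x = rb then ra else pvFind parent x := by
  have hrb0 : (0:Int) ≤ rb := by omega
  have hInv' : pvUFInv (parent.set rb.toNat ra) :=
    pvUFInv_set parent hInv ra rb hra0 (by omega) hrb0
  have hlen' : ((parent.set rb.toNat ra).length : Int) = (parent.length : Int) := by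
    rw [List.length_set]
  intro k
  induction k with
  | zero =>
    intro x hk hx0 hxl
    have hx : x = 0 := by omega
    subst hx
    have hp := pvPar_bounds parent hInv 0 le_rfl hxl
    have hroot : pvPar parent 0 = 0 := by omega
    have hne : (0:Int) ≠ rb := by omega
    have hroot' : pvPar (parent.set rb.toNat ra) 0 = 0 := by
      rw [pvPar_set parent ra rb 0 hrb0 hrbl le_rfl hxl, if_neg hne]
      exact hroot
    rw [pvFind_root _ hInv' 0 le_rfl (by omega) hroot',
        pvFind_root parent hInv 0 le_rfl hxl hroot, if_neg hne]
  | succ k ihk =>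
    intro x hk hx0 hxl
    by_cases hxb : x = rb
    · subst hxb
      have hfb : pvFind parent x = x := pvFind_root parent hInv x (by omega) hxl hrootb
      rw [hfb, if_pos rfl]
      have hpar' : pvPar (parent.set x.toNat ra) x = ra := by
        rw [pvPar_set parent ra x x hrb0 hrbl (by omega) hxl, if_pos rfl]
      rw [pvFind_step _ hInv' x (by omega) (by omega), hpar',
          if_neg (by omega : ¬ ra = x)]
      have hra' : pvPar (parent.set x.toNat ra) ra = ra := by
        rw [pvPar_set parent ra x ra hrb0 hrbl hra0 (by omega), if_neg (by omega)]
        exact hroota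
      exact pvFind_root _ hInv' ra hra0 (by omega) hra'
    · have hpar' : pvPar (parent.set rb.toNat ra) x = pvPar parent x := by
        rw [pvPar_set parent ra rb x hrb0 hrbl hx0 hxl, if_neg hxb]
      rw [pvFind_step _ hInv' x hx0 (by omega), hpar',
          pvFind_step parent hInv x hx0 hxl]
      by_cases hroot : pvPar parent x = x
      · rw [if_pos hroot, if_pos hroot, if_neg hxb]
      · rw [if_neg hroot, if_neg hroot]
        have hp := pvPar_bounds parent hInv x hx0 hxl
        have hplt : pvPar parent x < x := lt_of_le_of_ne hp.2 hroot
        exact ihk (pvPar parent x) (by omega) hp.1 (by omega)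

-- --- union(a, b) joins exactly the classes of a and b ---

theorem pvUnion_spec (parent : List Int) (hInv : pvUFInv parent) (a b : Int)
    (ha0 : 0 ≤ a) (hal : a < (parent.length : Int)) (hb0 : 0 ≤ b)
    (hbl : b < (parent.length : Int)) :
    (pvUnion parent a b).length = parent.length ∧ pvUFInv (pvUnion parent a b) ∧
    (∀ x y : Int, 0 ≤ x → x < (parent.length : Int) → 0 ≤ y → y < (parent.length : Int) →
      (pvFind (pvUnion parent a b) x = pvFind (pvUnion parent a b) y ↔
        (pvFind parent x = pvFind parent y ∨
         (pvFind parent x = pvFind parent a ∧ pvFind parent b = pvFind parent y) ∨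
         (pvFind parent x = pvFind parent b ∧ pvFind parent a = pvFind parent y)))) := by
  obtain ⟨hfa0, hfaa, hfar⟩ := pvFind_spec parent hInv a ha0 hal
  obtain ⟨hfb0, hfbb, hfbr⟩ := pvFind_spec parent hInv b hb0 hbl
  have hunion : pvUnion parent a b =
      (if pvFind parent a < pvFind parent b
       then PySem.List.pySetD parent (pvFind parent b) (pvFind parent a)
       else if pvFind parent b < pvFind parent a
       then PySem.List.pySetD parent (pvFind parent a) (pvFind parent b)
       else parent) := rfl
  rcases lt_trichotomy (pvFind parent a) (pvFind parent b) with hlt | heq | hlt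
  · rw [hunion, if_pos hlt, PySem.List.pySetD_of_nonneg _ _ hfb0]
    refine ⟨by rw [List.length_set], pvUFInv_set parent hInv _ _ hfa0 (by omega) hfb0, ?_⟩
    intro x y hx0 hxl hy0 hyl
    rw [pvFind_set parent hInv _ _ hfa0 hlt (by omega) hfbr hfar x.toNat x le_rfl hx0 hxl,
        pvFind_set parent hInv _ _ hfa0 hlt (by omega) hfbr hfar y.toNat y le_rfl hy0 hyl]
    split_ifs <;> omega
  · rw [hunion, if_neg (by omega), if_neg (by omega)]
    refine ⟨rfl, hInv, ?_⟩
    intro x y _ _ _ _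
    constructor
    · intro h; exact Or.inl h
    · rintro (h | ⟨h1, h2⟩ | ⟨h1, h2⟩) <;> omega
  · rw [hunion, if_neg (by omega), if_pos hlt, PySem.List.pySetD_of_nonneg _ _ hfa0]
    refine ⟨by rw [List.length_set], pvUFInv_set parent hInv _ _ hfb0 (by omega) hfa0, ?_⟩
    intro x y hx0 hxl hy0 hyl
    rw [pvFind_set parent hInv _ _ hfb0 hlt (by omega) hfar hfbr x.toNat x le_rfl hx0 hxl,
        pvFind_set parent hInv _ _ hfb0 hlt (by omega) hfar hfbr y.toNat y le_rfl hy0 hyl]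
    split_ifs <;> omega


-- --- grid encoding: cell (i, j) ↔ code i*n + j ---

def pvDec (n c : Int) : Int × Int := (c / n, c % n)

theorem pvDec_enc (n i j : Int) (hn : 1 ≤ n) (hj0 : 0 ≤ j) (hjn : j < n) :
    pvDec n (i * n + j) = (i, j) := by
  unfold pvDec
  have h1 : i * n + j = j + i * n := by ring
  rw [h1, Int.add_mul_ediv_right j i (by omega : n ≠ 0), Int.add_mul_emod_self_right,
      Int.ediv_eq_zero_of_lt hj0 hjn, Int.emod_eq_of_lt hj0 hjn]
  simp

theorem pvDec_inj (n x y : Int) (h : pvDec n x = pvDec n y) : x = y := by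
  have hx := Int.ediv_add_emod x n
  have hy := Int.ediv_add_emod y n
  have h1 : x / n = y / n := congrArg Prod.fst h
  have h2 : x % n = y % n := congrArg Prod.snd h
  have h3 : n * (x / n) = n * (y / n) := by rw [h1]
  omega

theorem pvDec_zero (n : Int) : pvDec n 0 = (0, 0) := by
  unfold pvDec
  rw [Int.zero_ediv, Int.zero_emod]

theorem pvDec_last (m n : Int) (hm : 1 ≤ m) (hn : 1 ≤ n) :
    pvDec n (m * n - 1) = (m - 1, n - 1) := by
  have h : m * n - 1 = (m - 1) * n + (n - 1) := by ring
  rw [h, pvDec_enc n (m - 1) (n - 1) hn (by omega) (by omega)]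

-- --- the edge relation contributed by a processed prefix PS of cells ---

def pvEdge (heights : List (List Int)) (mid m n : Int) (PS : List (Int × Int))
    (c d : Int × Int) : Prop :=
  ∃ q ∈ PS, (0 ≤ q.1 ∧ q.1 < m ∧ 0 ≤ q.2 ∧ q.2 < n) ∧
    (((q.2 + 1 < n ∧ |pvH heights q.1 q.2 - pvH heights q.1 (q.2 + 1)| ≤ mid) ∧
        ((c = q ∧ d = (q.1, q.2 + 1)) ∨ (c = (q.1, q.2 + 1) ∧ d = q))) ∨
     ((q.1 + 1 < m ∧ |pvH heights q.1 q.2 - pvH heights (q.1 + 1) q.2| ≤ mid) ∧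
        ((c = q ∧ d = (q.1 + 1, q.2)) ∨ (c = (q.1 + 1, q.2) ∧ d = q))))

def pvUFGood (heights : List (List Int)) (mid m n : Int) (PS : List (Int × Int))
    (par : List Int) : Prop :=
  par.length = (m * n).toNat ∧ pvUFInv par ∧
  ∀ x y : Int, 0 ≤ x → x < m * n → 0 ≤ y → y < m * n →
    (pvFind par x = pvFind par y ↔
      Relation.ReflTransGen (pvEdge heights mid m n PS) (pvDec n x) (pvDec n y))

-- one conditional union, seen through pvDec
theorem pvStage (m n : Int) (hmn : 1 ≤ m * n) (par : List Int)
    (R : Int × Int → Int × Int → Prop) (C : Prop) [Decidable C] (a b : Int)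
    (hab : C → 0 ≤ a ∧ a < m * n ∧ 0 ≤ b ∧ b < m * n)
    (hlen : par.length = (m * n).toNat) (hInv : pvUFInv par)
    (hiff : ∀ x y : Int, 0 ≤ x → x < m * n → 0 ≤ y → y < m * n →
      (pvFind par x = pvFind par y ↔ Relation.ReflTransGen R (pvDec n x) (pvDec n y))) :
    (if C then pvUnion par a b else par).length = (m * n).toNat ∧
    pvUFInv (if C then pvUnion par a b else par) ∧
    ∀ x y : Int, 0 ≤ x → x < m * n → 0 ≤ y → y < m * n →
      (pvFind (if C then pvUnion par a b else par) x =
         pvFind (if C then pvUnion par a b else par) y ↔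
        Relation.ReflTransGen
          (fun u v => R u v ∨ (C ∧ ((u = pvDec n a ∧ v = pvDec n b) ∨
            (u = pvDec n b ∧ v = pvDec n a)))) (pvDec n x) (pvDec n y)) := by
  have hlenI : ((par.length : Nat) : Int) = m * n := by
    rw [hlen]; exact Int.toNat_of_nonneg (by omega)
  by_cases hC : C
  · obtain ⟨ha0, hal, hb0, hbl⟩ := hab hC
    simp only [if_pos hC]
    obtain ⟨hl, hI, hf⟩ := pvUnion_spec par hInv a b ha0 (by omega) hb0 (by omega)
    refine ⟨by rw [hl, hlen], hI, ?_⟩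
    intro x y hx0 hxl hy0 hyl
    rw [hf x y hx0 (by omega) hy0 (by omega),
        hiff x y hx0 hxl hy0 hyl, hiff x a hx0 hxl ha0 hal, hiff b y hb0 hbl hy0 hyl,
        hiff x b hx0 hxl hb0 hbl, hiff a y ha0 hal hy0 hyl,
        ← pvRtg_join R (pvDec n a) (pvDec n b) (pvDec n x) (pvDec n y)]
    refine pvRtg_iff ?_
    intro u v
    simp [hC]
  · simp only [if_neg hC]
    refine ⟨hlen, hInv, ?_⟩
    intro x y hx0 hxl hy0 hyl
    rw [hiff x y hx0 hxl hy0 hyl]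
    refine pvRtg_iff ?_
    intro u v
    simp [hC]

theorem pvCell_good (heights : List (List Int)) (mid m n : Int) (hm : 1 ≤ m) (hn : 1 ≤ n)
    (PS : List (Int × Int)) (par : List Int) (p : Int × Int)
    (hp1 : 0 ≤ p.1) (hp2 : p.1 < m) (hp3 : 0 ≤ p.2) (hp4 : p.2 < n)
    (hg : pvUFGood heights mid m n PS par) :
    pvUFGood heights mid m n (PS ++ [p]) (pvCell heights mid m n par p) := by
  obtain ⟨hlen, hInv, hiff⟩ := hg
  have hmn : (1 : Int) ≤ m * n := by
    calc (1 : Int) = 1 * 1 := by ring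
    _ ≤ m * n := mul_le_mul hm hn (by norm_num) (by omega)
  obtain ⟨hl1, hI1, hf1⟩ := pvStage m n hmn par (pvEdge heights mid m n PS)
    (p.2 + 1 < n ∧ |pvH heights p.1 p.2 - pvH heights p.1 (p.2 + 1)| ≤ mid)
    (p.1 * n + p.2) (p.1 * n + p.2 + 1)
    (by
      intro hC
      obtain ⟨h1, h2⟩ := pvEnc_range m n p.1 p.2 hp1 hp2 hp3 hp4
      have h3 : p.1 * n + p.2 + 1 = p.1 * n + (p.2 + 1) := by ring
      obtain ⟨h4, h5⟩ := pvEnc_range m n p.1 (p.2 + 1) hp1 hp2 (by omega) hC.1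
      exact ⟨h1, h2, by omega, by omega⟩)
    hlen hInv hiff
  obtain ⟨hl2, hI2, hf2⟩ := pvStage m n hmn _ _
    (p.1 + 1 < m ∧ |pvH heights p.1 p.2 - pvH heights (p.1 + 1) p.2| ≤ mid)
    (p.1 * n + p.2) ((p.1 + 1) * n + p.2)
    (by
      intro hC
      obtain ⟨h1, h2⟩ := pvEnc_range m n p.1 p.2 hp1 hp2 hp3 hp4
      obtain ⟨h4, h5⟩ := pvEnc_range m n (p.1 + 1) p.2 (by omega) hC.1 hp3 hp4
      exact ⟨h1, h2, h4, h5⟩)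
    hl1 hI1 hf1
  have hcell : pvCell heights mid m n par p =
      (if p.1 + 1 < m ∧ |pvH heights p.1 p.2 - pvH heights (p.1 + 1) p.2| ≤ mid
       then pvUnion
         (if p.2 + 1 < n ∧ |pvH heights p.1 p.2 - pvH heights p.1 (p.2 + 1)| ≤ mid
          then pvUnion par (p.1 * n + p.2) (p.1 * n + p.2 + 1) else par)
         (p.1 * n + p.2) ((p.1 + 1) * n + p.2)
       else (if p.2 + 1 < n ∧ |pvH heights p.1 p.2 - pvH heights p.1 (p.2 + 1)| ≤ mid
          then pvUnion par (p.1 * n + p.2) (p.1 * n + p.2 + 1) else par)) := rfl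
  rw [pvUFGood, hcell]
  refine ⟨hl2, hI2, ?_⟩
  intro x y hx0 hxl hy0 hyl
  rw [hf2 x y hx0 hxl hy0 hyl]
  refine pvRtg_iff ?_
  intro c d
  have hda : pvDec n (p.1 * n + p.2) = p := by
    rw [pvDec_enc n p.1 p.2 hn hp3 hp4]
  constructor
  · rintro ((hE | ⟨hcr, hpair⟩) | ⟨hcd, hpair⟩)
    · obtain ⟨q, hq, hb, hcase⟩ := hE
      exact ⟨q, List.mem_append_left _ hq, hb, hcase⟩
    · have hdb : pvDec n (p.1 * n + p.2 + 1) = (p.1, p.2 + 1) := by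
        have h3 : p.1 * n + p.2 + 1 = p.1 * n + (p.2 + 1) := by ring
        rw [h3, pvDec_enc n p.1 (p.2 + 1) hn (by omega) hcr.1]
      refine ⟨p, List.mem_append_right _ (List.mem_singleton.mpr rfl),
        ⟨hp1, hp2, hp3, hp4⟩, Or.inl ⟨hcr, ?_⟩⟩
      rcases hpair with ⟨hc, hd⟩ | ⟨hc, hd⟩
      · exact Or.inl ⟨by rw [hc, hda], by rw [hd, hdb]⟩
      · exact Or.inr ⟨by rw [hc, hdb], by rw [hd, hda]⟩
    · have hdb : pvDec n ((p.1 + 1) * n + p.2) = (p.1 + 1, p.2) := by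
        rw [pvDec_enc n (p.1 + 1) p.2 hn hp3 hp4]
      refine ⟨p, List.mem_append_right _ (List.mem_singleton.mpr rfl),
        ⟨hp1, hp2, hp3, hp4⟩, Or.inr ⟨hcd, ?_⟩⟩
      rcases hpair with ⟨hc, hd⟩ | ⟨hc, hd⟩
      · exact Or.inl ⟨by rw [hc, hda], by rw [hd, hdb]⟩
      · exact Or.inr ⟨by rw [hc, hdb], by rw [hd, hda]⟩
  · rintro ⟨q, hq, hb, hcase⟩
    rcases List.mem_append.mp hq with hq | hq
    · exact Or.inl (Or.inl ⟨q, hq, hb, hcase⟩)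
    · rw [List.mem_singleton] at hq
      subst hq
      rcases hcase with ⟨hcr, hpair⟩ | ⟨hcd, hpair⟩
      · have hdb : pvDec n (q.1 * n + q.2 + 1) = (q.1, q.2 + 1) := by
          have h3 : q.1 * n + q.2 + 1 = q.1 * n + (q.2 + 1) := by ring
          rw [h3, pvDec_enc n q.1 (q.2 + 1) hn (by omega) hcr.1]
        refine Or.inl (Or.inr ⟨hcr, ?_⟩)
        rcases hpair with ⟨hc, hd⟩ | ⟨hc, hd⟩
        · exact Or.inl ⟨by rw [hc, hda], by rw [hd, hdb]⟩
        · exact Or.inr ⟨by rw [hc, hdb], by rw [hd, hda]⟩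
      · have hdb : pvDec n ((q.1 + 1) * n + q.2) = (q.1 + 1, q.2) := by
          rw [pvDec_enc n (q.1 + 1) q.2 hn hp3 hp4]
        refine Or.inr ⟨hcd, ?_⟩
        rcases hpair with ⟨hc, hd⟩ | ⟨hc, hd⟩
        · exact Or.inl ⟨by rw [hc, hda], by rw [hd, hdb]⟩
        · exact Or.inr ⟨by rw [hc, hdb], by rw [hd, hda]⟩

theorem pvCells_good (heights : List (List Int)) (mid m n : Int) (hm : 1 ≤ m) (hn : 1 ≤ n) :
    ∀ (CS PS : List (Int × Int)) (par : List Int),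
    (∀ c ∈ CS, 0 ≤ c.1 ∧ c.1 < m ∧ 0 ≤ c.2 ∧ c.2 < n) →
    pvUFGood heights mid m n PS par →
    pvUFGood heights mid m n (PS ++ CS) (CS.foldl (pvCell heights mid m n) par) := by
  intro CS
  induction CS with
  | nil => intro PS par _ hg; simpa using hg
  | cons p CS ih =>
    intro PS par hb hg
    obtain ⟨h1, h2, h3, h4⟩ := hb p List.mem_cons_self
    have hstep := pvCell_good heights mid m n hm hn PS par p h1 h2 h3 h4 hg
    have := ih (PS ++ [p]) (pvCell heights mid m n par p)
      (fun c hc => hb c (List.mem_cons_of_mem _ hc)) hstep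
    simpa using this

theorem pvBase (heights : List (List Int)) (mid m n : Int) (hm : 1 ≤ m) (hn : 1 ≤ n) :
    pvUFGood heights mid m n [] (PySem.List.pyRange 0 (m * n) 1) := by
  have hmn : (1 : Int) ≤ m * n := by
    calc (1 : Int) = 1 * 1 := by ring
    _ ≤ m * n := mul_le_mul hm hn (by norm_num) (by omega)
  have hlen : (PySem.List.pyRange 0 (m * n) 1).length = (m * n).toNat := by
    rw [PySem.List.length_pyRange_one]; simp
  have hval : ∀ k : Nat, (h : k < (PySem.List.pyRange 0 (m * n) 1).length) →
      (PySem.List.pyRange 0 (m * n) 1)[k] = (k : Int) := by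
    intro k h
    rw [PySem.List.getElem_pyRange_one]
    omega
  have hInv : pvUFInv (PySem.List.pyRange 0 (m * n) 1) := by
    intro k h
    rw [hval k h]
    omega
  refine ⟨hlen, hInv, ?_⟩
  intro x y hx0 hxl hy0 hyl
  have hfind : ∀ z : Int, 0 ≤ z → z < m * n →
      pvFind (PySem.List.pyRange 0 (m * n) 1) z = z := by
    intro z hz0 hzl
    have hzl' : z < ((PySem.List.pyRange 0 (m * n) 1).length : Int) := by
      rw [hlen]; omega
    refine pvFind_root _ hInv z hz0 hzl' ?_
    have := PySem.List.pyGetD_eq_getElem (PySem.List.pyRange 0 (m * n) 1) 0 hz0 hzl'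
    rw [pvPar, this, hval]
    omega
  rw [hfind x hx0 hxl, hfind y hy0 hyl]
  rw [pvRtg_empty (by rintro a b ⟨q, hq, _⟩; simp at hq)]
  constructor
  · rintro rfl; rfl
  · exact fun h => pvDec_inj n x y h

theorem pvMem_CL (m n : Int) (i j : Int) :
    (i, j) ∈ (PySem.List.pyRange 0 m 1).flatMap
      (fun i => (PySem.List.pyRange 0 n 1).map (fun j => (i, j))) ↔
    (0 ≤ i ∧ i < m ∧ 0 ≤ j ∧ j < n) := by
  constructor
  · intro h
    obtain ⟨a, ha, hmem⟩ := List.mem_flatMap.mp h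
    obtain ⟨b, hb, heq⟩ := List.mem_map.mp hmem
    obtain ⟨rfl, rfl⟩ := Prod.mk.injEq .. |>.mp heq
    obtain ⟨ha1, ha2⟩ := PySem.List.mem_pyRange_one.mp ha
    obtain ⟨hb1, hb2⟩ := PySem.List.mem_pyRange_one.mp hb
    exact ⟨by omega, by omega, by omega, by omega⟩
  · rintro ⟨h1, h2, h3, h4⟩
    exact List.mem_flatMap.mpr ⟨i, PySem.List.mem_pyRange_one.mpr ⟨h1, h2⟩,
      List.mem_map.mpr ⟨j, PySem.List.mem_pyRange_one.mpr ⟨h3, h4⟩, rfl⟩⟩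

theorem pvEdge_full_iff (heights : List (List Int)) (mid m n : Int)
    (hm : 1 ≤ m) (hn : 1 ≤ n) (c d : Int × Int) :
    pvEdge heights mid m n
      ((PySem.List.pyRange 0 m 1).flatMap
        (fun i => (PySem.List.pyRange 0 n 1).map (fun j => (i, j)))) c d ↔
    pvAdj heights mid m n c d := by
  constructor
  · rintro ⟨q, _, hb, hcase⟩
    rcases hcase with ⟨⟨hj1, hh⟩, ho⟩ | ⟨⟨hi1, hh⟩, ho⟩ <;>
      rcases ho with ⟨rfl, rfl⟩ | ⟨rfl, rfl⟩
    · exact ⟨hb, ⟨hb.1, hb.2.1, by omega, hj1⟩, Or.inl ⟨rfl, Or.inl rfl⟩, hh⟩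
    · exact ⟨⟨hb.1, hb.2.1, by omega, hj1⟩, hb, Or.inl ⟨rfl, Or.inr rfl⟩,
        by rw [abs_sub_comm]; exact hh⟩
    · exact ⟨hb, ⟨by omega, hi1, hb.2.2.1, hb.2.2.2⟩, Or.inr ⟨rfl, Or.inl rfl⟩, hh⟩
    · exact ⟨⟨by omega, hi1, hb.2.2.1, hb.2.2.2⟩, hb, Or.inr ⟨rfl, Or.inr rfl⟩,
        by rw [abs_sub_comm]; exact hh⟩
  · rintro ⟨hgc, hgd, hshape, hh⟩
    obtain ⟨c1, c2⟩ := c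
    obtain ⟨d1, d2⟩ := d
    simp only [pvGood] at hgc hgd
    rcases hshape with ⟨he, h2 | h2⟩ | ⟨he, h2 | h2⟩
    · -- right edge c → d
      obtain rfl : c1 = d1 := by omega
      obtain rfl : c2 + 1 = d2 := by omega
      exact ⟨(c1, c2), (pvMem_CL m n c1 c2).mpr hgc, hgc,
        Or.inl ⟨⟨by omega, hh⟩, Or.inl ⟨rfl, rfl⟩⟩⟩
    · -- right edge d → c
      obtain rfl : c1 = d1 := by omega
      obtain rfl : d2 + 1 = c2 := by omega
      exact ⟨(c1, d2), (pvMem_CL m n c1 d2).mpr hgd, hgd,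
        Or.inl ⟨⟨by omega, by rw [abs_sub_comm]; exact hh⟩, Or.inr ⟨rfl, rfl⟩⟩⟩
    · -- down edge c → d
      obtain rfl : c2 = d2 := by omega
      obtain rfl : c1 + 1 = d1 := by omega
      exact ⟨(c1, c2), (pvMem_CL m n c1 c2).mpr hgc, hgc,
        Or.inr ⟨⟨by omega, hh⟩, Or.inl ⟨rfl, rfl⟩⟩⟩
    · -- down edge d → c
      obtain rfl : c2 = d2 := by omega
      obtain rfl : d1 + 1 = c1 := by omega
      exact ⟨(d1, c2), (pvMem_CL m n d1 c2).mpr hgd, hgd,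
        Or.inr ⟨⟨by omega, by rw [abs_sub_comm]; exact hh⟩, Or.inr ⟨rfl, rfl⟩⟩⟩

theorem alt_iff_reach (heights : List (List Int)) (mid m n : Int)
    (hp : pvPreGrid heights m n) :
    bfs_alt heights mid m n = true ↔ pvReach heights mid m n (0, 0) (m - 1, n - 1) := by
  obtain ⟨hm, hn, _, _⟩ := hp
  rw [show bfs_alt heights mid m n = _ from if_neg (by omega)]
  have hmn : (1 : Int) ≤ m * n := by
    calc (1 : Int) = 1 * 1 := by ring
    _ ≤ m * n := mul_le_mul hm hn (by norm_num) (by omega)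
  have hfull := pvCells_good heights mid m n hm hn
    ((PySem.List.pyRange 0 m 1).flatMap
      (fun i => (PySem.List.pyRange 0 n 1).map (fun j => (i, j)))) []
    (PySem.List.pyRange 0 (m * n) 1)
    (fun c hc => by
      obtain ⟨c1, c2⟩ := c
      exact (pvMem_CL m n c1 c2).mp hc)
    (pvBase heights mid m n hm hn)
  rw [List.nil_append] at hfull
  obtain ⟨_, _, hiff⟩ := hfull
  show decide (pvFind _ 0 = pvFind _ (m * n - 1)) = true ↔ _
  rw [decide_eq_true_iff]
  rw [hiff 0 (m * n - 1) le_rfl (by omega) (by omega) (by omega)]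
  rw [pvDec_zero n, pvDec_last m n hm hn]
  exact pvRtg_iff (fun c d => pvEdge_full_iff heights mid m n hm hn c d)

-- degenerate declarations: both programs answer without touching the grid

theorem pvStep_out (heights : List (List Int)) (mid m n x y : Int)
    (hd : (m ≤ 0 ∨ n ≤ 0) ∨ (m = 1 ∧ n = 1 ∧ x = 0 ∧ y = 0)) (v q : List (Int × Int))
    (hnd : v.Nodup) :
    [(x - 1, y), (x + 1, y), (x, y - 1), (x, y + 1)].foldl
      (pvStep heights mid m n x y) (v, q) = (v, q) := by
  obtain ⟨ds, heq, _, hin, _⟩ :=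
    pvStep_foldl heights mid m n x y [(x - 1, y), (x + 1, y), (x, y - 1), (x, y + 1)] v q hnd
  have hds : ds = [] := by
    rw [List.eq_nil_iff_forall_not_mem]
    intro c hc
    obtain ⟨hmem, hg, _⟩ := hin c hc
    obtain ⟨hg1, hg2, hg3, hg4⟩ := hg
    simp only [List.mem_cons, List.not_mem_nil, or_false] at hmem
    obtain ⟨c1, c2⟩ := c
    simp only [pvGood] at hg1 hg2 hg3 hg4
    rcases hmem with h | h | h | h <;> rw [Prod.mk.injEq] at h <;> omega
  rw [hds] at heq
  simpa using heq

theorem bfs_small (heights : List (List Int)) (mid m n : Int)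
    (hd : (m ≤ 0 ∨ n ≤ 0) ∨ (m = 1 ∧ n = 1)) :
    bfs heights mid m n = PySem.Set.contains [((0:Int), (0:Int))] (m - 1, n - 1) := by
  have hof : PySem.Set.ofList [((0 : Int), (0 : Int))] = [((0 : Int), (0 : Int))] :=
    PySem.Set.ofList_eq_self_of_nodup _ (List.nodup_singleton _)
  show PySem.Set.contains
      (bfsLoop heights mid m n ((m * n).toNat + 1) [(0, 0)] (PySem.Set.ofList [(0, 0)]))
      (m - 1, n - 1) = _
  rw [hof]
  have hstep := pvStep_out heights mid m n 0 0
    (by rcases hd with h | h; exacts [Or.inl h, Or.inr ⟨h.1, h.2, rfl, rfl⟩])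
    [((0:Int), (0:Int))] [] (List.nodup_singleton _)
  have hloop : bfsLoop heights mid m n ((m * n).toNat + 1) [(0, 0)] [(0, 0)] =
      [((0:Int), (0:Int))] := by
    rw [show bfsLoop heights mid m n ((m * n).toNat + 1) [(0, 0)] [(0, 0)] =
      bfsLoop heights mid m n ((m * n).toNat)
        ([(0 - 1, 0), (0 + 1, 0), (0, 0 - 1), (0, 0 + 1)].foldl
          (pvStep heights mid m n 0 0) ([((0:Int), (0:Int))], [])).2
        ([(0 - 1, 0), (0 + 1, 0), (0, 0 - 1), (0, 0 + 1)].foldl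
          (pvStep heights mid m n 0 0) ([((0:Int), (0:Int))], [])).1 from rfl]
    rw [hstep]
    cases h : (m * n).toNat with
    | zero => rfl
    | succ k => rfl
  rw [hloop]

theorem bfs_spec_degen (heights : List (List Int)) (mid m n : Int)
    (hd : m ≤ 0 ∨ n ≤ 0) : bfs heights mid m n = bfs_alt heights mid m n := by
  rw [show bfs_alt heights mid m n = false from if_pos hd]
  rw [bfs_small heights mid m n (Or.inl hd)]
  rw [← Bool.not_eq_true, PySem.Set.contains_iff]
  intro hmem
  rw [List.mem_singleton, Prod.mk.injEq] at hmem
  omega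

theorem bfs_spec_one (heights : List (List Int)) (mid m n : Int)
    (hm : m = 1) (hn : n = 1) : bfs heights mid m n = bfs_alt heights mid m n := by
  subst hm; subst hn
  rw [bfs_small heights mid 1 1 (Or.inr ⟨rfl, rfl⟩)]
  have h1 : PySem.Set.contains [((0:Int), (0:Int))] ((1:Int) - 1, (1:Int) - 1) = true := by
    rw [PySem.Set.contains_iff]
    simp
  rw [h1]
  rw [show bfs_alt heights mid 1 1 = _ from if_neg (by omega)]
  rfl

-- ===== VERDICT (by name: the statement is the Claim_ definition above) =====
theorem bfs_spec : Claim_equal_bfs := by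
  intro heights mid m n _hd hp
  unfold Spec_bfs
  rcases hp with hd | ⟨hm, hn⟩ | hg
  · exact bfs_spec_degen heights mid m n hd
  · exact bfs_spec_one heights mid m n hm hn
  · have h := (bfs_iff_reach heights mid m n hg).trans (alt_iff_reach heights mid m n hg).symm
    cases hA : bfs heights mid m n <;> cases hB : bfs_alt heights mid m n <;>
      simp [hA, hB] at h ⊢
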